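-- pv_equiv track=rewrite | github.com/DragonMoffon/GodotTest | python/rhyme.py | SyllabificationsRhyme
-- ===== SOURCE A (Python) =====
-- def SyllabificationsRhyme(syllable1,syllable2): #assumes it's in the same rhymegroup
--     seenStressed=False
--     for s1,s2 in zip(syllable1[::-1],syllable2[::-1]):
--         if(s1[0]==1):#if it is a stressed
--             seenStressed=True
--         if(seenStressed):
--             if s1[1]!=s2[1] and s1[2]==s2[2] and s1[3]==s2[3]:
--                 return True;
--             if s1[1]!=s2[1] or s1[2]!=s2[2] or s1[3]!=s2[3]:
--                 return False;
--     return False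
-- ===== SOURCE B (Python) =====
-- def SyllabificationsRhyme(syllable1, syllable2):
--     # Align the two words at their ends and scan FORWARD (no reversal, no early
--     # return): keep the classification of the most recent mismatching pair, and
--     # record it whenever a stressed syllable of word 1 is seen; the value recorded
--     # at the last stress is the answer (stress nearest the end decides, judged by
--     # the mismatch nearest the end at or before it -- exactly A's reversed scan).
--     n = min(len(syllable1), len(syllable2))
--     answer = False
--     last = None
--     for s1, s2 in zip(syllable1[len(syllable1)-n:], syllable2[len(syllable2)-n:]):
--         if s1[1] != s2[1] or s1[2] != s2[2] or s1[3] != s2[3]: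
--             last = s1[1] != s2[1] and s1[2] == s2[2] and s1[3] == s2[3]
--         if s1[0] == 1:
--             answer = bool(last)
--     return answer
-- ===== Notes on version B (the rewrite author's own statement) =====
-- stated objective: alternative
-- what changed: Replaced A's backward scan with early returns by a single FORWARD pass over the end-aligned pairs with two accumulators (classification of the most recent mismatch, answer recorded at each stress); correctness rests on the observation that A's result is the classification of the last mismatch at or before the last stressed paired syllable.
-- outside the precondition, e.g. on SyllabificationsRhyme([[9], [1, 5, 3, 4]], [[8], [1, 6, 3, 4]]): A returns True, B raises IndexError
import Mathlib
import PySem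

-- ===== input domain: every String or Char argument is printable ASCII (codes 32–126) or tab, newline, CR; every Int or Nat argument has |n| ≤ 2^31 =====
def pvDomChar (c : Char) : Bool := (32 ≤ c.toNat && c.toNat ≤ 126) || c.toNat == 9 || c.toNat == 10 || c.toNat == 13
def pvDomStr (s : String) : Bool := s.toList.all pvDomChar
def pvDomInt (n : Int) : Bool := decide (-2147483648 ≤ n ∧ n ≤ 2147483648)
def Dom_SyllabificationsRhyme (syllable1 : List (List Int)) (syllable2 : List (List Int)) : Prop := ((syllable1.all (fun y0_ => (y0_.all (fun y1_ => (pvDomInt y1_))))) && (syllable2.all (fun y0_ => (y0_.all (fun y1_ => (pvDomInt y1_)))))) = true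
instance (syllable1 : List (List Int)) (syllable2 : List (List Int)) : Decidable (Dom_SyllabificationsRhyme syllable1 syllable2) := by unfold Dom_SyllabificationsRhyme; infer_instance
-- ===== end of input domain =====

-- B replaces A's backward early-return scan by one forward pass with two
-- accumulators; same cost ('alternative' in the claim).

-- ===== PORT A =====
-- s[i] on an inner list; Pre_ guarantees every index read is in range, so the
-- default is never used on admitted inputs.
def pvIx (l : List Int) (i : Int) : Int := (PySem.List.pyGet? l i).getD 0

-- A's for-loop over zip(syllable1[::-1], syllable2[::-1]) with the seenStressed flag
def pvLoopA : List (List Int × List Int) → Bool → Bool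
  | [], _ => false
  | (s1, s2) :: rest, seen =>
    let seen' := if pvIx s1 0 == 1 then true else seen
    if seen' then
      if pvIx s1 1 != pvIx s2 1 && pvIx s1 2 == pvIx s2 2 && pvIx s1 3 == pvIx s2 3 then true
      else if pvIx s1 1 != pvIx s2 1 || pvIx s1 2 != pvIx s2 2 || pvIx s1 3 != pvIx s2 3 then false
      else pvLoopA rest seen'
    else pvLoopA rest seen'

def SyllabificationsRhyme (syllable1 : List (List Int)) (syllable2 : List (List Int)) : Bool :=
  pvLoopA (List.zip ((PySem.List.slice? syllable1 none none (-1)).getD []) ((PySem.List.slice? syllable2 none none (-1)).getD [])) false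

-- ===== PORT B =====
-- B's forward for-loop; state: last = classification of the most recent mismatching
-- pair (none if no mismatch yet), answer = value recorded at the latest stress
def pvLoopB : List (List Int × List Int) → Option Bool → Bool → Bool
  | [], _, answer => answer
  | (s1, s2) :: rest, last, answer =>
    let last' := if pvIx s1 1 != pvIx s2 1 || pvIx s1 2 != pvIx s2 2 || pvIx s1 3 != pvIx s2 3
      then some (pvIx s1 1 != pvIx s2 1 && pvIx s1 2 == pvIx s2 2 && pvIx s1 3 == pvIx s2 3)
      else last
    let answer' := if pvIx s1 0 == 1 then last'.getD false else answer
    pvLoopB rest last' answer'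

def SyllabificationsRhyme_alt (syllable1 : List (List Int)) (syllable2 : List (List Int)) : Bool :=
  let n := min syllable1.length syllable2.length
  pvLoopB (List.zip (syllable1.drop (syllable1.length - n)) (syllable2.drop (syllable2.length - n))) none false

-- ===== PRECONDITION & SPEC =====
-- Pre_ admits exactly the inputs on which B's full forward pass performs all its
-- (short-circuited) tuple reads in range: each paired tuple has components [0..2],
-- and component [3] as well unless the two tuples already differ at [2]. This is
-- narrower than A's return domain: A can return early without ever touching a later
-- short tuple (see the excluded example in the claim), where B raises IndexError.
def Pre_SyllabificationsRhyme (syllable1 : List (List Int)) (syllable2 : List (List Int)) : Prop :=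
  ∀ p ∈ List.zip syllable1.reverse syllable2.reverse,
    (3 ≤ p.1.length ∧ 3 ≤ p.2.length) ∧
    (p.1.getD 2 0 ≠ p.2.getD 2 0 ∨ (4 ≤ p.1.length ∧ 4 ≤ p.2.length))
instance (syllable1 : List (List Int)) (syllable2 : List (List Int)) : Decidable (Pre_SyllabificationsRhyme syllable1 syllable2) := by unfold Pre_SyllabificationsRhyme; infer_instance

def pvWitness_SyllabificationsRhyme : List (List Int) × List (List Int) :=
  ([[1, 2, 3, 4]], [[1, 5, 3, 4]])

def Spec_SyllabificationsRhyme (syllable1 : List (List Int)) (syllable2 : List (List Int)) (out : Bool) : Prop := out = SyllabificationsRhyme_alt syllable1 syllable2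
instance (syllable1 : List (List Int)) (syllable2 : List (List Int)) (out : Bool) : Decidable (Spec_SyllabificationsRhyme syllable1 syllable2 out) := by unfold Spec_SyllabificationsRhyme; infer_instance

-- ===== CLAIM (what is proved, stated in full; the proofs are below) =====
def Claim_equal_SyllabificationsRhyme : Prop := ∀ (syllable1 : List (List Int)) (syllable2 : List (List Int)), Dom_SyllabificationsRhyme syllable1 syllable2 → Pre_SyllabificationsRhyme syllable1 syllable2 → Spec_SyllabificationsRhyme syllable1 syllable2 (SyllabificationsRhyme syllable1 syllable2)

-- ===== LEMMAS AND PROOFS =====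
-- abbreviations for one pair: stress, mismatch, classification
def pvS (p : List Int × List Int) : Bool := pvIx p.1 0 == 1
def pvM (p : List Int × List Int) : Bool :=
  pvIx p.1 1 != pvIx p.2 1 || pvIx p.1 2 != pvIx p.2 2 || pvIx p.1 3 != pvIx p.2 3
def pvC (p : List Int × List Int) : Bool :=
  pvIx p.1 1 != pvIx p.2 1 && pvIx p.1 2 == pvIx p.2 2 && pvIx p.1 3 == pvIx p.2 3

-- the outcome of A's loop body as a small machine: decided, or still running with a flag
inductive pvOut where
  | dec : Bool → pvOut
  | run : Bool → pvOut

def pvRunA : List (List Int × List Int) → Bool → pvOut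
  | [], seen => .run seen
  | p :: rest, seen =>
    let seen' := seen || pvS p
    if seen' && pvM p then .dec (pvC p) else pvRunA rest seen'

theorem pvIf_or (b c : Bool) : (if c then true else b) = (b || c) := by
  cases b <;> cases c <;> rfl

theorem pvLoopA_eq_runA (l : List (List Int × List Int)) (seen : Bool) :
    pvLoopA l seen = (match pvRunA l seen with | .dec b => b | .run _ => false) := by
  induction l generalizing seen with
  | nil => rfl
  | cons p rest ih =>
    obtain ⟨s1, s2⟩ := p
    simp only [pvLoopA, pvRunA, pvS, pvM, pvC]
    rw [pvIf_or]
    generalize (seen || (pvIx s1 0 == 1)) = t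
    cases t with
    | false => simp [ih]
    | true =>
      by_cases e1 : (pvIx s1 1 == pvIx s2 1) = true <;>
        by_cases e2 : (pvIx s1 2 == pvIx s2 2) = true <;>
          by_cases e3 : (pvIx s1 3 == pvIx s2 3) = true <;>
            simp_all [bne]

theorem pvRunA_append (xs ys : List (List Int × List Int)) (seen : Bool) :
    pvRunA (xs ++ ys) seen =
      (match pvRunA xs seen with | .dec b => .dec b | .run s => pvRunA ys s) := by
  induction xs generalizing seen with
  | nil => rfl
  | cons p rest ih =>
    simp only [List.cons_append, pvRunA]
    by_cases h : ((seen || pvS p) && pvM p) = true <;> simp [h, ih]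

-- master invariant: B's forward pass computes A's backward outcome
theorem pvLoopB_eq (t : List (List Int × List Int)) (last : Option Bool) (answer : Bool) :
    pvLoopB t last answer =
      (match pvRunA t.reverse false with
        | .dec b => b
        | .run true => last.getD false
        | .run false => answer) := by
  induction t generalizing last answer with
  | nil => rfl
  | cons p rest ih =>
    obtain ⟨s1, s2⟩ := p
    rw [List.reverse_cons, pvRunA_append]
    simp only [pvLoopB]
    rw [ih]
    have hM : (pvIx s1 1 != pvIx s2 1 || pvIx s1 2 != pvIx s2 2 || pvIx s1 3 != pvIx s2 3)
        = pvM (s1, s2) := rfl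
    have hC : (pvIx s1 1 != pvIx s2 1 && pvIx s1 2 == pvIx s2 2 && pvIx s1 3 == pvIx s2 3)
        = pvC (s1, s2) := rfl
    have hS : (pvIx s1 0 == 1) = pvS (s1, s2) := rfl
    rw [hM, hC, hS]
    cases hr : pvRunA rest.reverse false with
    | dec b => simp
    | run s =>
      simp only [pvRunA]
      cases s <;> by_cases hm : pvM (s1, s2) = true <;>
        by_cases hst : pvS (s1, s2) = true <;> simp [hm, hst]

-- zip of the reverses is the reverse of the zip, for equal lengths
theorem pvZipRev {α β : Type} (a : List α) (b : List β) (h : a.length = b.length) :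
    List.zip a.reverse b.reverse = (List.zip a b).reverse := by
  induction a generalizing b with
  | nil => cases b <;> simp_all
  | cons x a' ih =>
    cases b with
    | nil => simp at h
    | cons y b' =>
      simp only [List.reverse_cons]
      rw [List.zip_append (by simpa using h), ih b' (by simpa using h)]
      simp

-- the reversed zip equals the reverse of the zip of the end-aligned suffixes
theorem pvZipRevDrop (s1 s2 : List (List Int)) :
    List.zip s1.reverse s2.reverse =
      (List.zip (s1.drop (s1.length - min s1.length s2.length))
                (s2.drop (s2.length - min s1.length s2.length))).reverse := by
  set n := min s1.length s2.length with hn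
  have hl1 : (s1.drop (s1.length - n)).length = n := by
    simp only [List.length_drop]; omega
  have hl2 : (s2.drop (s2.length - n)).length = n := by
    simp only [List.length_drop]; omega
  have hz1 : s1.reverse = (s1.drop (s1.length - n)).reverse ++ (s1.take (s1.length - n)).reverse := by
    rw [← List.reverse_append, List.take_append_drop]
  have hz2 : s2.reverse = (s2.drop (s2.length - n)).reverse ++ (s2.take (s2.length - n)).reverse := by
    rw [← List.reverse_append, List.take_append_drop]
  rw [hz1, hz2, List.zip_append (by simp [hl1, hl2]),
      pvZipRev _ _ (by simp [hl1, hl2])]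
  have htail : List.zip (s1.take (s1.length - n)).reverse (s2.take (s2.length - n)).reverse = [] := by
    rcases le_total s1.length s2.length with h | h
    · have : s1.length - n = 0 := by omega
      simp [this]
    · have : s2.length - n = 0 := by omega
      simp [this]
  rw [htail, List.append_nil]

-- ===== VERDICT (by name: the statement is the Claim_ definition above) =====
theorem SyllabificationsRhyme_spec : Claim_equal_SyllabificationsRhyme := by
  intro s1 s2 _ _
  unfold Spec_SyllabificationsRhyme SyllabificationsRhyme SyllabificationsRhyme_alt
  rw [PySem.List.slice?_none_none_neg_one, PySem.List.slice?_none_none_neg_one]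
  simp only [Option.getD_some]
  rw [pvLoopA_eq_runA, pvLoopB_eq, ← pvZipRevDrop]
  cases pvRunA (List.zip s1.reverse s2.reverse) false with
  | dec b => rfl
  | run s => cases s <;> rfl
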